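-- pv_equiv track=rewrite | github.com/saniya3012168/EnerSense_ver_2 | app.py | time_slot_recommendations
-- ===== SOURCE A (Python) =====
-- def time_slot_recommendations(solar_value, tariff_schedule=None):
--     # tariff_schedule: dict of hour->tariff (optional). We'll return recommended hours.
--     # Simple heuristic: if solar_value high -> recommend midday (10-16), if low -> recommend off-peak tariff hours if provided
--     rec = []
--     if solar_value >= 500:
--         rec.append("Prefer running heavy appliances between 10:00 - 16:00 (high solar generation).")
--     else:
--         rec.append("Solar is low — consider shifting flexible loads to off-peak tariff hours if available.")
--     if tariff_schedule:
--         # find hours with min tariff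
--         min_tariff = min(tariff_schedule.values())
--         off_peak_hours = [h for h,t in tariff_schedule.items() if t == min_tariff]
--         rec.append(f"Off-peak tariff hours: {off_peak_hours}")
--     return rec
-- ===== SOURCE B (Python) =====
-- def time_slot_recommendations(solar_value, tariff_schedule=None):
--     if solar_value >= 500:
--         rec = ["Prefer running heavy appliances between 10:00 - 16:00 (high solar generation)."]
--     else:
--         rec = ["Solar is low — consider shifting flexible loads to off-peak tariff hours if available."]
--     if tariff_schedule:
--         # single pass: track the running minimum tariff and the hours achieving it
--         items = iter(tariff_schedule.items())
--         first_hour, min_tariff = next(items)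
--         off_peak_hours = [first_hour]
--         for h, t in items:
--             if t < min_tariff:
--                 min_tariff = t
--                 off_peak_hours = [h]
--             elif t == min_tariff:
--                 off_peak_hours.append(h)
--         rec.append(f"Off-peak tariff hours: {off_peak_hours}")
--     return rec
-- ===== Notes on version B (the rewrite author's own statement) =====
-- stated objective: alternative
-- what changed: The tariff branch's min()-then-comprehension two-pass is replaced by a single loop over the items that maintains the running minimum tariff and the list of hours achieving it (reset on a strictly smaller tariff, append on a tie).
import Mathlib
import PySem

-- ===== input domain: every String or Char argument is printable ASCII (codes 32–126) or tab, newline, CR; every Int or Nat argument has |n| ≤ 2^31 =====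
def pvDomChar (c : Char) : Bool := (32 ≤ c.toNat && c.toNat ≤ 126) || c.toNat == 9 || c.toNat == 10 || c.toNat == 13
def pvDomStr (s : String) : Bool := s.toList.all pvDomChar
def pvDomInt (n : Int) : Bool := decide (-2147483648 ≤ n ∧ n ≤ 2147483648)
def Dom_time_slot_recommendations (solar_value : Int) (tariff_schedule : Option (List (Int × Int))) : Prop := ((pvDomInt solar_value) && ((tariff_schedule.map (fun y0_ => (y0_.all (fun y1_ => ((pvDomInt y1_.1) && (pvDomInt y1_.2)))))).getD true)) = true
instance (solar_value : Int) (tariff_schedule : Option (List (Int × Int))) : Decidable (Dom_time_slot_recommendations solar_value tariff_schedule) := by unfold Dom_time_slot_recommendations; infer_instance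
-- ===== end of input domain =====

-- B replaces A's min()-then-filter two-pass over the tariff schedule by one pass keeping the
-- running minimum and the hours achieving it (objective: alternative decomposition, same cost).

-- shared helper: the f-string rendering "Off-peak tariff hours: [h1, h2, …]" (Python list repr of ints)
def pvFmtHours (hs : List Int) : String :=
  "Off-peak tariff hours: [" ++ String.intercalate ", " (hs.map PySem.Int.toStr) ++ "]"

-- ===== PORT A =====
def time_slot_recommendations (solar_value : Int) (tariff_schedule : Option (List (Int × Int))) : List String :=
  let recs : List String :=
    if solar_value ≥ 500 then
      ["Prefer running heavy appliances between 10:00 - 16:00 (high solar generation)."]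
    else
      ["Solar is low — consider shifting flexible loads to off-peak tariff hours if available."]
  match tariff_schedule with
  | none => recs
  | some items =>
    if items.isEmpty then recs      -- 'if tariff_schedule:' — empty dict is falsy
    else
      match PySem.List.min? (items.map (·.2)) (fun x => x) with
      | none => recs                -- unreachable: items is nonempty
      | some min_tariff =>
        let off_peak_hours := (items.filter (fun p => p.2 == min_tariff)).map (·.1)
        recs ++ [pvFmtHours off_peak_hours]

-- ===== PORT B =====
-- the loop body of B's single pass: strictly smaller tariff resets the hour list, a tie appends
def pvStep (s : Int × List Int) (p : Int × Int) : Int × List Int :=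
  if p.2 < s.1 then (p.2, [p.1])
  else if p.2 == s.1 then (s.1, s.2 ++ [p.1])
  else s

def time_slot_recommendations_alt (solar_value : Int) (tariff_schedule : Option (List (Int × Int))) : List String :=
  let recs : List String :=
    if solar_value ≥ 500 then
      ["Prefer running heavy appliances between 10:00 - 16:00 (high solar generation)."]
    else
      ["Solar is low — consider shifting flexible loads to off-peak tariff hours if available."]
  match tariff_schedule with
  | none => recs
  | some [] => recs                 -- 'if tariff_schedule:' — empty dict is falsy
  | some ((h0, t0) :: rest) =>
    let st := rest.foldl pvStep (t0, [h0])
    recs ++ [pvFmtHours st.2]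

-- ===== PRECONDITION & SPEC =====
def Spec_time_slot_recommendations (solar_value : Int) (tariff_schedule : Option (List (Int × Int))) (out : List String) : Prop := out = time_slot_recommendations_alt solar_value tariff_schedule
instance (solar_value : Int) (tariff_schedule : Option (List (Int × Int))) (out : List String) : Decidable (Spec_time_slot_recommendations solar_value tariff_schedule out) := by unfold Spec_time_slot_recommendations; infer_instance

-- ===== CLAIM (what is proved, stated in full; the proofs are below) =====
def Claim_equal_time_slot_recommendations : Prop := ∀ (solar_value : Int) (tariff_schedule : Option (List (Int × Int))), Dom_time_slot_recommendations solar_value tariff_schedule → Spec_time_slot_recommendations solar_value tariff_schedule (time_slot_recommendations solar_value tariff_schedule)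

-- ===== LEMMAS AND PROOFS =====

-- loop invariant of B's single pass: after folding l from state (m, hs) the state holds the
-- minimum of m and l's tariffs, and (hs if m is still minimal, else []) ++ l's hours at that minimum
theorem pvStep_foldl (l : List (Int × Int)) : ∀ (m : Int) (hs : List Int),
    l.foldl pvStep (m, hs) =
      ((l.map (·.2)).foldl min m,
       (if (l.map (·.2)).foldl min m = m then hs else []) ++
         (l.filter (fun p => p.2 == (l.map (·.2)).foldl min m)).map (·.1)) := by
  induction l with
  | nil => intro m hs; simp
  | cons p rest ih =>
    intro m hs
    obtain ⟨h, t⟩ := p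
    simp only [List.foldl_cons, List.map_cons, List.filter_cons]
    rcases lt_trichotomy t m with h1 | h1 | h1
    · -- strictly smaller: the state is reset to (t, [h])
      have hstep : pvStep (m, hs) (h, t) = (t, [h]) := by simp [pvStep, h1]
      have hm : min m t = t := by omega
      have hmin := (PySem.List.foldl_min_le (rest.map (·.2)) t).1
      have hne : (rest.map (·.2)).foldl min t ≠ m := by omega
      rw [hstep, ih t [h]]
      simp only [hm]
      simp only [hne, if_false, List.nil_append, beq_iff_eq]
      by_cases h2 : (rest.map (·.2)).foldl min t = t
      · simp [h2]
      · have : ¬ (t = (rest.map (·.2)).foldl min t) := fun he => h2 he.symm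
        simp [h2, this]
    · -- tie: h is appended
      have hstep : pvStep (m, hs) (h, t) = (m, hs ++ [h]) := by
        simp [pvStep, h1]
      have hm : min m t = m := by omega
      rw [hstep, ih m (hs ++ [h])]
      simp only [hm]
      simp only [beq_iff_eq]
      by_cases h2 : (rest.map (·.2)).foldl min m = m
      · subst h1; simp [h2]
      · have : ¬ (t = (rest.map (·.2)).foldl min m) := by rw [h1]; exact fun he => h2 he.symm
        simp [h2, this]
    · -- strictly larger: the state is unchanged
      have hstep : pvStep (m, hs) (h, t) = (m, hs) := by
        have hne : ¬ ((t == m) = true) := by simp; omega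
        simp [pvStep, hne, not_lt_of_gt h1]
      have hm : min m t = m := by omega
      have hmin := (PySem.List.foldl_min_le (rest.map (·.2)) m).1
      rw [hstep, ih m hs]
      simp only [hm, beq_iff_eq]
      have : ¬ (t = (rest.map (·.2)).foldl min m) := by omega
      simp [this]

-- ===== VERDICT (by name: the statement is the Claim_ definition above) =====
theorem time_slot_recommendations_spec : Claim_equal_time_slot_recommendations := by
  intro solar_value tariff_schedule _
  unfold Spec_time_slot_recommendations
  rcases tariff_schedule with _ | (_ | ⟨⟨h0, t0⟩, rest⟩)
  · rfl
  · rfl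
  · simp only [time_slot_recommendations, time_slot_recommendations_alt, List.isEmpty_cons,
      Bool.false_eq_true, if_false, List.map_cons,
      PySem.List.min?_id_cons, List.filter_cons, pvStep_foldl, beq_iff_eq]
    by_cases h2 : (rest.map (·.2)).foldl min t0 = t0
    · rw [if_pos h2, if_pos h2.symm]
      simp
    · have hne' : ¬ (t0 = (rest.map (·.2)).foldl min t0) := fun he => h2 he.symm
      rw [if_neg h2, if_neg hne']
      simp
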